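-- pv_equiv track=rewrite | github.com/clivehoggart/BridgePRS | src/Python/Util/old/BridgePop.py | get_prefix_suffix
-- ===== SOURCE A (Python) =====
-- def get_prefix_suffix(cands):
--     my_prefix,my_suffix, k = ' ', ' ', 0
--     while True:
--         my_prefixes = list(set([c[0:k] for c in cands]))
--         if len(my_prefixes) == 1:
--             my_prefix = my_prefixes[0]
--             k+=1
--         else:
--             break
--     k = 0
--     while True:
--         my_suffixes = list(set([c[len(c)-k::] for c in cands]))
--         if len(my_suffixes) == 1:
--             my_suffix = my_suffixes[0]
--             k+=1
--         else:
--             break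
--
--     if len(my_prefix) == 0: my_prefix = ' '
--     if len(my_suffix) == 0: my_suffix = ' '
--     return my_prefix, my_suffix
-- ===== SOURCE B (Python) =====
-- def get_prefix_suffix(cands):
--     # One pass per string: fold a char-by-char common-prefix over the list
--     # (suffixes handled by the same fold on the reversed strings).
--     def common(a, b):
--         if a and b and a[0] == b[0]:
--             return a[0] + common(a[1:], b[1:])
--         return ''
--     if not cands:
--         return ' ', ' '
--     pre = cands[0]
--     suf = cands[0][::-1]
--     for c in cands[1:]:
--         pre = common(pre, c)
--         suf = common(suf, c[::-1])
--     if pre == '': pre = ' '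
--     if suf == '': suf = ' '
--     return pre, suf[::-1]
-- ===== Notes on version B (the rewrite author's own statement) =====
-- stated objective: alternative
-- what changed: A grows k and, for each k, rebuilds the set of all k-prefixes (and k-suffixes) of all strings; B makes one pass, folding a char-by-char common-prefix of two strings over the list (and over the reversed strings for the suffix) - intended as asymptotically faster (O(n*L) vs O(n*L^2)) but a timing run could not confirm a ratio, so no speed is claimed.
import Mathlib
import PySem

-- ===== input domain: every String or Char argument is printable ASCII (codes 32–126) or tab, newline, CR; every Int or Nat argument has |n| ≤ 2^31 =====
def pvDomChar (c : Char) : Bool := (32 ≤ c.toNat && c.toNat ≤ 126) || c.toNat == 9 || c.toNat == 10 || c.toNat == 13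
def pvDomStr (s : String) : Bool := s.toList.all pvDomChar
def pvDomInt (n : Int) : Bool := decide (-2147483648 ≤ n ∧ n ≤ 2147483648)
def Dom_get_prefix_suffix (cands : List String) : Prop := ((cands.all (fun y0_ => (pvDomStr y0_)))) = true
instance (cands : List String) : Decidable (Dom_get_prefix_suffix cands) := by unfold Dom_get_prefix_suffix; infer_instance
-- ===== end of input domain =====

-- B replaces A's grow-k-and-rebuild-a-set loops by one char-by-char common-prefix fold
-- (suffix = the same fold on the reversed strings); A's Python returns a 2-tuple,
-- rendered here as a 2-element list per the type convention.

-- ===== PORT A =====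
-- while True: my_prefixes = list(set([c[0:k] for c in cands])); if len == 1: keep, k += 1; else: break
-- (the fuel argument only makes the recursion total: inside Pre_ the loop breaks within fuel steps)
def pvPrefLoop (cands : List String) (pre : String) (k : Nat) : Nat → String
  | 0 => pre
  | fuel+1 =>
    let ps := PySem.Set.ofList (cands.map (fun c => PySem.Str.slice c (some 0) (some (k : Int))))
    if ps.length = 1 then pvPrefLoop cands ps.headI (k+1) fuel else pre

-- while True: my_suffixes = list(set([c[len(c)-k::] for c in cands])); if len == 1: keep, k += 1; else: break
def pvSufLoop (cands : List String) (suf : String) (k : Nat) : Nat → String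
  | 0 => suf
  | fuel+1 =>
    let ss := PySem.Set.ofList (cands.map (fun c => PySem.Str.slice c (some (PySem.Str.len c - (k : Int))) none))
    if ss.length = 1 then pvSufLoop cands ss.headI (k+1) fuel else suf

def get_prefix_suffix (cands : List String) : List String :=
  let fuel := cands.foldl (fun m c => max m c.toList.length) 0 + 2
  let my_prefix := pvPrefLoop cands " " 0 fuel
  let my_suffix := pvSufLoop cands " " 0 fuel
  [if PySem.Str.len my_prefix = 0 then " " else my_prefix,
   if PySem.Str.len my_suffix = 0 then " " else my_suffix]

-- ===== PORT B =====
-- def common(a, b): recursive char-by-char longest common prefix of two strings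
def pvCommon : List Char → List Char → List Char
  | a :: as, b :: bs => if a = b then a :: pvCommon as bs else []
  | _, _ => []

def get_prefix_suffix_alt (cands : List String) : List String :=
  match cands with
  | [] => [" ", " "]
  | c0 :: rest =>
    let pre := rest.foldl (fun p c => pvCommon p c.toList) c0.toList
    let suf := rest.foldl (fun p c => pvCommon p c.toList.reverse) c0.toList.reverse
    [if pre = [] then " " else String.ofList pre,
     if suf = [] then " " else String.ofList suf.reverse]

-- ===== PRECONDITION & SPEC =====
-- Pre_ excludes nonempty lists whose elements are all equal: on those A's two while-loops
-- never break (the slice set stays a singleton for every k), so A never returns.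
def Pre_get_prefix_suffix (cands : List String) : Prop :=
  cands = [] ∨ ∃ c ∈ cands, c ≠ cands.headI
instance (cands : List String) : Decidable (Pre_get_prefix_suffix cands) := by
  unfold Pre_get_prefix_suffix; infer_instance

def pvWitness_get_prefix_suffix : List String := ["ab", "ac"]

def Spec_get_prefix_suffix (cands : List String) (out : List String) : Prop := out = get_prefix_suffix_alt cands
instance (cands : List String) (out : List String) : Decidable (Spec_get_prefix_suffix cands out) := by unfold Spec_get_prefix_suffix; infer_instance

-- ===== CLAIM (what is proved, stated in full; the proofs are below) =====
def Claim_equal_get_prefix_suffix : Prop := ∀ (cands : List String), Dom_get_prefix_suffix cands → Pre_get_prefix_suffix cands → Spec_get_prefix_suffix cands (get_prefix_suffix cands)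

-- ===== LEMMAS AND PROOFS =====

theorem pvCommon_prefix_left : ∀ a b : List Char, pvCommon a b <+: a := by
  intro a
  induction a with
  | nil => intro b; cases b <;> simp [pvCommon]
  | cons x xs ih =>
    intro b
    cases b with
    | nil => simp [pvCommon]
    | cons y ys =>
      by_cases h : x = y
      · simpa [pvCommon, h] using ih ys
      · simp [pvCommon, h]

theorem pvCommon_prefix_right : ∀ a b : List Char, pvCommon a b <+: b := by
  intro a
  induction a with
  | nil => intro b; cases b <;> simp [pvCommon]
  | cons x xs ih =>
    intro b
    cases b with
    | nil => simp [pvCommon]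
    | cons y ys =>
      by_cases h : x = y
      · subst h; simpa [pvCommon] using ih ys
      · simp [pvCommon, h]

theorem pvCommon_self : ∀ a : List Char, pvCommon a a = a := by
  intro a; induction a with
  | nil => simp [pvCommon]
  | cons x xs ih => simp [pvCommon, ih]

theorem pvCommon_take_iff : ∀ (a b : List Char) (k : Nat),
    a.take k = b.take k ↔ k ≤ (pvCommon a b).length ∨ a = b := by
  intro a
  induction a with
  | nil =>
    intro b k
    cases b with
    | nil => simp [pvCommon]
    | cons y ys =>
      cases k with
      | zero => simp [pvCommon]
      | succ k =>
        simp only [pvCommon, List.take_nil, List.take_succ_cons, List.length_nil]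
        constructor
        · intro h; exact absurd h.symm (by simp)
        · rintro (h | h)
          · omega
          · simp at h
  | cons x xs ih =>
    intro b k
    cases b with
    | nil =>
      cases k with
      | zero => simp [pvCommon]
      | succ k =>
        simp only [pvCommon, List.take_nil, List.take_succ_cons, List.length_nil]
        constructor
        · intro h; exact absurd h (by simp)
        · rintro (h | h)
          · omega
          · simp at h
    | cons y ys =>
      by_cases hxy : x = y
      · subst hxy
        cases k with
        | zero => exact iff_of_true rfl (Or.inl (Nat.zero_le _))
        | succ k =>
          have hc : pvCommon (x :: xs) (x :: ys) = x :: pvCommon xs ys := by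
            simp [pvCommon]
          rw [hc]
          simp only [List.take_succ_cons, List.cons.injEq, true_and, List.length_cons]
          rw [ih ys k]
          constructor
          · rintro (h | h)
            · left; omega
            · right; rw [h]
          · rintro (h | h)
            · left; omega
            · exact Or.inr h
      · have hc : pvCommon (x :: xs) (y :: ys) = [] := by simp [pvCommon, hxy]
        rw [hc]
        cases k with
        | zero => exact iff_of_true rfl (Or.inl (Nat.zero_le _))
        | succ k =>
          simp only [List.take_succ_cons, List.cons.injEq, List.length_nil]
          constructor
          · rintro ⟨h, -⟩; exact absurd h hxy
          · rintro (h | h)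
            · omega
            · exact absurd h.1 hxy

theorem pvFoldP_prefix : ∀ (ls : List (List Char)) (p : List Char), ls.foldl pvCommon p <+: p := by
  intro ls
  induction ls with
  | nil => intro p; simp
  | cons l ls ih =>
    intro p
    exact (ih (pvCommon p l)).trans (pvCommon_prefix_left p l)

theorem pvFoldP_prefix_mem : ∀ (ls : List (List Char)) (p l : List Char), l ∈ ls → ls.foldl pvCommon p <+: l := by
  intro ls
  induction ls with
  | nil => intro p l h; simp at h
  | cons l0 ls ih =>
    intro p l h
    rcases List.mem_cons.mp h with h | h
    · subst h
      exact (pvFoldP_prefix ls (pvCommon p l)).trans (pvCommon_prefix_right p l)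
    · exact ih (pvCommon p l0) l h

theorem pvFoldP_self : ∀ (ls : List (List Char)) (p : List Char), (∀ l ∈ ls, l = p) → ls.foldl pvCommon p = p := by
  intro ls
  induction ls with
  | nil => intro p _; rfl
  | cons l ls ih =>
    intro p h
    have h0 : l = p := h l (by simp)
    subst h0
    rw [List.foldl_cons, pvCommon_self]
    exact ih l (fun x hx => h x (by simp [hx]))

theorem pvTake_eq_of_prefix {s t : List Char} (h : s <+: t) {k : Nat} (hk : k ≤ s.length) :
    t.take k = s.take k := by
  rcases h with ⟨u, rfl⟩
  rw [List.take_append_of_le_length hk]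

theorem pvFoldP_take (ls : List (List Char)) (p : List Char) (k : Nat)
    (hk : k ≤ (ls.foldl pvCommon p).length) : ∀ l ∈ ls, l.take k = p.take k := by
  intro l hl
  rw [pvTake_eq_of_prefix (pvFoldP_prefix_mem ls p l hl) hk,
      pvTake_eq_of_prefix (pvFoldP_prefix ls p) hk]

theorem pvCommon_length_comm : ∀ a b : List Char, (pvCommon a b).length = (pvCommon b a).length := by
  intro a
  induction a with
  | nil => intro b; cases b <;> simp [pvCommon]
  | cons x xs ih =>
    intro b
    cases b with
    | nil => simp [pvCommon]
    | cons y ys =>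
      by_cases h : x = y
      · subst h; simp [pvCommon, ih ys]
      · have h2 : ¬ (y = x) := fun hh => h hh.symm
        simp [pvCommon, h, h2]

theorem pvFoldP_witness : ∀ (ls : List (List Char)) (p : List Char),
    ¬ (∀ l ∈ ls, l = p) →
    ∃ l ∈ ls, l.take ((ls.foldl pvCommon p).length + 1) ≠ p.take ((ls.foldl pvCommon p).length + 1) := by
  intro ls
  induction ls with
  | nil => intro p h; exact absurd (by simp) h
  | cons c ls ih =>
    intro p h
    set m := ((c :: ls).foldl pvCommon p).length with hm
    rw [List.foldl_cons] at hm
    by_cases hc : c.take (m+1) = p.take (m+1)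
    case neg => exact ⟨c, by simp, hc⟩
    case pos =>
    have hcase := (pvCommon_take_iff c p (m+1)).mp hc
    by_cases hpc : p = c
    · -- p = c : recurse with the same accumulator
      have h' : ¬ (∀ l ∈ ls, l = p) := fun hall => h (fun l hl => by
        rcases List.mem_cons.mp hl with h1 | h1
        · rw [h1, hpc]
        · exact hall l h1)
      have hfold : pvCommon p c = p := by rw [hpc, pvCommon_self]
      obtain ⟨l, hl, hne⟩ := ih (pvCommon p c) (by rw [hfold]; exact h')
      refine ⟨l, by simp [hl], ?_⟩
      rw [hm]
      rw [hfold] at hne ⊢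
      exact hne
    · -- p ≠ c, so m+1 ≤ |pvCommon p c|
      have hle : m + 1 ≤ (pvCommon p c).length := by
        rw [pvCommon_length_comm]
        rcases hcase with h1 | h1
        · exact h1
        · exact absurd h1.symm hpc
      have hnall : ¬ (∀ l ∈ ls, l = pvCommon p c) := by
        intro hall
        have hf : ls.foldl pvCommon (pvCommon p c) = pvCommon p c := pvFoldP_self ls _ hall
        have hlen : m = (pvCommon p c).length := by rw [hm, hf]
        omega
      obtain ⟨l, hl, hne⟩ := ih (pvCommon p c) hnall
      refine ⟨l, by simp [hl], ?_⟩
      rw [hm]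
      intro heq
      apply hne
      rw [← hm] at *
      rw [heq, pvTake_eq_of_prefix (pvCommon_prefix_left p c) (by omega)]

theorem pvOfList_all_eq {α : Type} [DecidableEq α] : ∀ (l : List α) (v : α), l ≠ [] →
    (∀ x ∈ l, x = v) → PySem.Set.ofList l = [v] := by
  have aux : ∀ (l : List α) (v : α), (∀ x ∈ l, x = v) → l.foldl PySem.Set.add [v] = [v] := by
    intro l
    induction l with
    | nil => intro v _; rfl
    | cons x l ih =>
      intro v h
      have hx : x = v := h x (by simp)
      subst hx
      have : PySem.Set.add [x] x = [x] := by simp [PySem.Set.add, PySem.Set.contains]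
      rw [List.foldl_cons, this]
      exact ih x (fun y hy => h y (by simp [hy]))
  intro l v hne h
  cases l with
  | nil => exact absurd rfl hne
  | cons x l =>
    have hx : x = v := h x (by simp)
    subst hx
    have h0 : PySem.Set.add ([] : PySem.Set α) x = [x] := by simp [PySem.Set.add, PySem.Set.contains]
    calc PySem.Set.ofList (x :: l) = l.foldl PySem.Set.add [x] := by
          rw [PySem.Set.ofList_eq_foldl, List.foldl_cons, h0]
      _ = [x] := aux l x (fun y hy => h y (by simp [hy]))

theorem pvLen_one_mem {α : Type} {l : List α} {a b : α} (h : l.length = 1)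
    (ha : a ∈ l) (hb : b ∈ l) : a = b := by
  match l, h with
  | [x], _ =>
    simp at ha hb; rw [ha, hb]

theorem pvSet_two_ne_len {α : Type} [DecidableEq α] {l : List α} {a b : α}
    (ha : a ∈ l) (hb : b ∈ l) (hab : a ≠ b) : (PySem.Set.ofList l).length ≠ 1 := by
  intro h1
  exact hab (pvLen_one_mem h1 ((PySem.Set.mem_ofList _ _).mpr ha) ((PySem.Set.mem_ofList _ _).mpr hb))

theorem pvMaxlen_le : ∀ (l : List String) (b : Nat), b ≤ l.foldl (fun m c => max m c.toList.length) b := by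
  intro l
  induction l with
  | nil => intro b; simp
  | cons x l ih => intro b; exact le_trans (le_max_left _ _) (ih (max b x.toList.length))

theorem pvMaxlen_mem : ∀ (l : List String) (b : Nat) (c : String), c ∈ l →
    c.toList.length ≤ l.foldl (fun m c => max m c.toList.length) b := by
  intro l
  induction l with
  | nil => intro b c h; simp at h
  | cons x l ih =>
    intro b c h
    rcases List.mem_cons.mp h with h | h
    · subst h; exact le_trans (le_max_right _ _) (pvMaxlen_le l _)
    · exact ih _ c h



theorem pvSlicePre_toList (c : String) (k : Nat) :
    (PySem.Str.slice c (some 0) (some (k : Int))).toList = c.toList.take k := by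
  simp [pysem]

theorem pvSliceSuf_toList (c : String) (k : Nat) (hk : k ≤ c.toList.length) :
    (PySem.Str.slice c (some (PySem.Str.len c - (k : Int))) none).toList
      = (c.toList.reverse.take k).reverse := by
  have h1 : (PySem.Str.slice c (some (PySem.Str.len c - (k : Int))) none).toList
      = c.toList.drop (PySem.List.clampIdx c.toList.length ((c.toList.length : Int) - k)) := by
    simp [pysem, PySem.Str.len, PySem.List.slice_some_none]
  have hlen : c.length = c.toList.length := by simp
  have h2 : PySem.List.clampIdx c.toList.length ((c.toList.length : Int) - k) = c.toList.length - k := by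
    rw [← hlen] at hk ⊢
    simp [PySem.List.clampIdx]; omega
  rw [h1, h2, List.take_reverse, List.reverse_reverse]

-- break lemma, prefix: if two candidates' k-prefixes differ the loop returns pre
theorem pvPrefLoop_break (cands : List String) (pre : String) (k : Nat) (fuel : Nat)
    (h : ∃ a ∈ cands, ∃ b ∈ cands, a.toList.take k ≠ b.toList.take k) :
    pvPrefLoop cands pre k fuel = pre := by
  cases fuel with
  | zero => rfl
  | succ f =>
    obtain ⟨a, ha, b, hb, hab⟩ := h
    have hne : PySem.Str.slice a (some 0) (some (k : Int)) ≠ PySem.Str.slice b (some 0) (some (k : Int)) := by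
      intro he
      exact hab (by rw [← pvSlicePre_toList a k, ← pvSlicePre_toList b k, he])
    have hlen := pvSet_two_ne_len (l := cands.map (fun c => PySem.Str.slice c (some 0) (some (k : Int))))
      (List.mem_map_of_mem ha) (List.mem_map_of_mem hb) hne
    simp only [pvPrefLoop]
    rw [if_neg hlen]

theorem pvSufLoop_break (cands : List String) (pre : String) (k : Nat) (fuel : Nat)
    (h : ∃ a ∈ cands, ∃ b ∈ cands,
      PySem.Str.slice a (some (PySem.Str.len a - (k : Int))) none
        ≠ PySem.Str.slice b (some (PySem.Str.len b - (k : Int))) none) :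
    pvSufLoop cands pre k fuel = pre := by
  cases fuel with
  | zero => rfl
  | succ f =>
    obtain ⟨a, ha, b, hb, hab⟩ := h
    have hlen := pvSet_two_ne_len
      (l := cands.map (fun c => PySem.Str.slice c (some (PySem.Str.len c - (k : Int))) none))
      (List.mem_map_of_mem ha) (List.mem_map_of_mem hb) hab
    simp only [pvSufLoop]
    rw [if_neg hlen]

theorem pvPrefLoop_run (c0 : String) (rest : List String)
    (hne : ¬ (∀ c ∈ rest, c = c0)) :
    ∀ (fuel k : Nat) (pre : String),
      k ≤ ((rest.map String.toList).foldl pvCommon c0.toList).length →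
      ((rest.map String.toList).foldl pvCommon c0.toList).length + 2 ≤ fuel + k →
      pvPrefLoop (c0 :: rest) pre k fuel
        = String.ofList ((rest.map String.toList).foldl pvCommon c0.toList) := by
  set P := (rest.map String.toList).foldl pvCommon c0.toList with hP
  set m := P.length with hm
  have hnall : ¬ (∀ l ∈ rest.map String.toList, l = c0.toList) := by
    intro hall
    exact hne (fun c hc => String.toList_inj.mp (hall c.toList (List.mem_map_of_mem hc)))
  intro fuel
  induction fuel with
  | zero => intro k pre hk hf; omega
  | succ f ih =>
    intro k pre hk hf
    -- all k-slices agree with c0's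
    have hall : ∀ s ∈ (c0 :: rest).map (fun c => PySem.Str.slice c (some 0) (some (k : Int))),
        s = PySem.Str.slice c0 (some 0) (some (k : Int)) := by
      intro s hs
      obtain ⟨c, hc, rfl⟩ := List.mem_map.mp hs
      apply String.toList_inj.mp
      rw [pvSlicePre_toList, pvSlicePre_toList]
      rcases List.mem_cons.mp hc with h | h
      · rw [h]
      · exact pvFoldP_take _ _ k hk c.toList (List.mem_map_of_mem h)
    have hset : PySem.Set.ofList ((c0 :: rest).map (fun c => PySem.Str.slice c (some 0) (some (k : Int))))
        = [PySem.Str.slice c0 (some 0) (some (k : Int))] := by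
      exact pvOfList_all_eq _ _ (by simp) hall
    simp only [pvPrefLoop, hset]
    norm_num
    by_cases hkm : k < m
    · exact ih (k+1) _ (by omega) (by omega)
    · -- k = m : next step breaks
      have hkm' : k = m := by omega
      obtain ⟨l, hl, hlne⟩ := pvFoldP_witness (rest.map String.toList) c0.toList hnall
      obtain ⟨cw, hcw, rfl⟩ := List.mem_map.mp hl
      rw [pvPrefLoop_break (c0 :: rest) _ (k+1) f
        ⟨cw, by simp [hcw], c0, by simp, by rw [hkm']; exact hlne⟩]
      apply String.toList_inj.mp
      rw [pvSlicePre_toList, hkm', hm]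
      simp only [String.toList_ofList]
      exact ((List.prefix_iff_eq_take.mp (pvFoldP_prefix _ _))).symm

theorem pvStrLen_eq (c : String) : ((c.length : Int)) = PySem.Str.len c := by
  simp [PySem.Str.len]

theorem pvSliceSuf_len_le (c : String) (k : Int) :
    (PySem.Str.slice c (some (PySem.Str.len c - k)) none).toList.length ≤ c.toList.length := by
  simp [pysem, PySem.Str.len, PySem.List.slice_some_none]

theorem pvSufLoop_run (c0 : String) (rest : List String)
    (hne : ¬ (∀ c ∈ rest, c = c0)) :
    ∀ (fuel k : Nat) (pre : String),
      k ≤ ((rest.map (fun c : String => c.toList.reverse)).foldl pvCommon c0.toList.reverse).length →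
      ((rest.map (fun c : String => c.toList.reverse)).foldl pvCommon c0.toList.reverse).length + 2 ≤ fuel + k →
      pvSufLoop (c0 :: rest) pre k fuel
        = String.ofList ((rest.map (fun c : String => c.toList.reverse)).foldl pvCommon c0.toList.reverse).reverse := by
  set R := (rest.map (fun c : String => c.toList.reverse)).foldl pvCommon c0.toList.reverse with hR
  set m := R.length with hm
  have hnall : ¬ (∀ l ∈ rest.map (fun c : String => c.toList.reverse), l = c0.toList.reverse) := by
    intro hall
    exact hne (fun c hc => String.toList_inj.mp
      (List.reverse_injective (hall c.toList.reverse (List.mem_map_of_mem hc))))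
  -- m ≤ length of every candidate
  have hmle : ∀ c ∈ (c0 :: rest), m ≤ c.toList.length := by
    intro c hc
    rcases List.mem_cons.mp hc with h | h
    · rw [h, hm]
      simpa using (pvFoldP_prefix (rest.map (fun c : String => c.toList.reverse)) c0.toList.reverse).length_le
    · rw [hm]
      simpa using (pvFoldP_prefix_mem (rest.map (fun c : String => c.toList.reverse))
        c0.toList.reverse c.toList.reverse (List.mem_map_of_mem h)).length_le
  intro fuel
  induction fuel with
  | zero => intro k pre hk hf; omega
  | succ f ih =>
    intro k pre hk hf
    have hall : ∀ s ∈ (c0 :: rest).map (fun c => PySem.Str.slice c (some (PySem.Str.len c - (k : Int))) none),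
        s = PySem.Str.slice c0 (some (PySem.Str.len c0 - (k : Int))) none := by
      intro s hs
      obtain ⟨c, hc, rfl⟩ := List.mem_map.mp hs
      apply String.toList_inj.mp
      rw [pvSliceSuf_toList c k (le_trans hk (hmle c hc)),
          pvSliceSuf_toList c0 k (le_trans hk (hmle c0 (by simp)))]
      congr 1
      rcases List.mem_cons.mp hc with h | h
      · rw [h]
      · exact pvFoldP_take _ _ k hk c.toList.reverse (List.mem_map_of_mem h)
    have hset : PySem.Set.ofList ((c0 :: rest).map (fun c => PySem.Str.slice c (some (PySem.Str.len c - (k : Int))) none))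
        = [PySem.Str.slice c0 (some (PySem.Str.len c0 - (k : Int))) none] := by
      exact pvOfList_all_eq _ _ (by simp) hall
    simp only [pvSufLoop, hset]
    norm_num
    by_cases hkm : k < m
    · exact ih (k+1) _ (by omega) (by omega)
    · have hkm' : k = m := by omega
      -- witness: some cw's (m+1)-suffix of the reversed list differs from c0's
      obtain ⟨l, hl, hlne⟩ := pvFoldP_witness (rest.map (fun c : String => c.toList.reverse)) c0.toList.reverse hnall
      obtain ⟨cw, hcw, rfl⟩ := List.mem_map.mp hl
      rw [← hR, ← hm] at hlne
      -- the (m+1)-slices of cw and c0 differ as strings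
      have hslne : PySem.Str.slice cw (some (PySem.Str.len cw - ((k+1 : Nat) : Int))) none
          ≠ PySem.Str.slice c0 (some (PySem.Str.len c0 - ((k+1 : Nat) : Int))) none := by
        have hmw : m ≤ cw.toList.length := hmle cw (by simp [hcw])
        have hm0 : m ≤ c0.toList.length := hmle c0 (by simp)
        rw [hkm']
        intro he
        have he' := congrArg String.toList he
        by_cases hw : m + 1 ≤ cw.toList.length
        · by_cases h0 : m + 1 ≤ c0.toList.length
          · rw [pvSliceSuf_toList cw (m+1) hw, pvSliceSuf_toList c0 (m+1) h0] at he'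
            exact hlne (List.reverse_injective he')
          · -- c0 has length m, cw longer: slice lengths differ
            have h0m : c0.toList.length = m := by omega
            have hlw : (PySem.Str.slice cw (some (PySem.Str.len cw - ((m+1 : Nat) : Int))) none).toList.length = m + 1 := by
              rw [pvSliceSuf_toList cw (m+1) hw]
              have hb : cw.length = cw.toList.length := by simp
              simp; omega
            have hl0 : (PySem.Str.slice c0 (some (PySem.Str.len c0 - ((m+1 : Nat) : Int))) none).toList.length ≤ m := by
              have := pvSliceSuf_len_le c0 ((m+1 : Nat) : Int)
              omega
            rw [he'] at hlw
            omega
        · by_cases h0 : m + 1 ≤ c0.toList.length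
          · have hwm : cw.toList.length = m := by omega
            have hl0 : (PySem.Str.slice c0 (some (PySem.Str.len c0 - ((m+1 : Nat) : Int))) none).toList.length = m + 1 := by
              rw [pvSliceSuf_toList c0 (m+1) h0]
              have hb : c0.length = c0.toList.length := by simp
              simp; omega
            have hlw : (PySem.Str.slice cw (some (PySem.Str.len cw - ((m+1 : Nat) : Int))) none).toList.length ≤ m := by
              have := pvSliceSuf_len_le cw ((m+1 : Nat) : Int)
              omega
            rw [he'] at hlw
            omega
          · -- both have length exactly m: then both reversed lists equal R, contradicting hlne
            have hwm : cw.toList.length = m := by omega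
            have h0m : c0.toList.length = m := by omega
            have hw' : cw.toList.reverse = R := by
              have hp := pvFoldP_prefix_mem (rest.map (fun c : String => c.toList.reverse))
                c0.toList.reverse cw.toList.reverse (List.mem_map_of_mem hcw)
              rw [← hR] at hp
              exact (List.IsPrefix.eq_of_length hp (by simp [hwm, hm])).symm
            have h0' : c0.toList.reverse = R := by
              have hp := pvFoldP_prefix (rest.map (fun c : String => c.toList.reverse)) c0.toList.reverse
              rw [← hR] at hp
              exact (List.IsPrefix.eq_of_length hp (by simp [h0m, hm])).symm
            exact hlne (by rw [hw', h0'])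
      rw [pvSufLoop_break (c0 :: rest) _ (k+1) f
        ⟨cw, by simp [hcw], c0, by simp, hslne⟩]
      apply String.toList_inj.mp
      rw [pvStrLen_eq c0]
      rw [pvSliceSuf_toList c0 k (le_trans hk (hmle c0 (by simp))), hkm']
      simp only [String.toList_ofList]
      congr 1
      rw [hm]
      exact ((List.prefix_iff_eq_take.mp (pvFoldP_prefix _ _))).symm


-- ===== VERDICT (by name: the statement is the Claim_ definition above) =====
theorem get_prefix_suffix_spec : Claim_equal_get_prefix_suffix := by
  intro cands _ hpre
  unfold Spec_get_prefix_suffix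
  cases cands with
  | nil => decide
  | cons c0 rest =>
    have hne : ¬ (∀ c ∈ rest, c = c0) := by
      rcases hpre with h | ⟨c, hc, hcne⟩
      · exact absurd h (by simp)
      · intro hall
        rcases List.mem_cons.mp hc with h1 | h1
        · exact hcne (by rw [h1]; rfl)
        · exact hcne (by rw [hall c h1]; rfl)
    have hP : rest.foldl (fun p c => pvCommon p c.toList) c0.toList
        = (rest.map String.toList).foldl pvCommon c0.toList := by rw [List.foldl_map]
    have hR : rest.foldl (fun p c => pvCommon p c.toList.reverse) c0.toList.reverse
        = (rest.map (fun c : String => c.toList.reverse)).foldl pvCommon c0.toList.reverse := by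
      rw [List.foldl_map]
    set P := (rest.map String.toList).foldl pvCommon c0.toList with hPdef
    set R := (rest.map (fun c : String => c.toList.reverse)).foldl pvCommon c0.toList.reverse with hRdef
    have hmP : P.length ≤ c0.toList.length := by
      simpa using (pvFoldP_prefix (rest.map String.toList) c0.toList).length_le
    have hmR : R.length ≤ c0.toList.length := by
      simpa using (pvFoldP_prefix (rest.map (fun c : String => c.toList.reverse)) c0.toList.reverse).length_le
    have hfuel : c0.toList.length ≤ (c0 :: rest).foldl (fun m c => max m c.toList.length) 0 :=
      pvMaxlen_mem (c0 :: rest) 0 c0 (by simp)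
    show get_prefix_suffix (c0 :: rest) = get_prefix_suffix_alt (c0 :: rest)
    unfold get_prefix_suffix get_prefix_suffix_alt
    simp only [hP, hR]
    rw [pvPrefLoop_run c0 rest hne _ 0 " " (Nat.zero_le _) (by rw [← hPdef]; omega),
        pvSufLoop_run c0 rest hne _ 0 " " (Nat.zero_le _) (by rw [← hRdef]; omega)]
    have hlenP : PySem.Str.len (String.ofList P) = (P.length : Int) := by
      rw [← pvStrLen_eq]; simp
    have hlenR : PySem.Str.len (String.ofList R.reverse) = (R.length : Int) := by
      rw [← pvStrLen_eq]; simp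
    rw [hlenP, hlenR]
    congr 1
    · split_ifs with h1 h2 h2
      · rfl
      · exact absurd (by simpa using h1) h2
      · exact absurd (by simp [h2]) h1
      · rfl
    · congr 1
      split_ifs with h1 h2 h2
      · rfl
      · exact absurd (by simpa using h1) h2
      · exact absurd (by simp [h2]) h1
      · rfl
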